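-- pv_equiv track=rewrite | github.com/djeada/Nauka-Programowania | src/Python/24_Listy_trudne/Zad4.py | znajdzPodciagV1
-- ===== SOURCE A (Python) =====
-- def znajdzPodciagV1(listaA, listaB):
--
--     if len(listaA) != len(listaB):
--         return False
--
--     histo = {}
--
--     histo[0] = -1
--
--     wynik, sumaA, sumaB = 0, 0, 0
--
--     for i in range(len(listaA)):
--
--         sumaA += listaA[i]
--         sumaB += listaB[i]
--
--         roznica = sumaA - sumaB
--
--         if roznica not in histo:
--             histo[roznica] = i
--
--         else:
--             wynik = max(wynik, i - histo[roznica])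
--
--     return wynik
-- ===== SOURCE B (Python) =====
-- def znajdzPodciagV1(listaA, listaB):
--     if len(listaA) != len(listaB):
--         return False
--     pref = [0]
--     for a, b in zip(listaA, listaB):
--         pref.append(pref[-1] + (a - b))
--     wynik = 0
--     for l in range(1, len(pref)):
--         for k in range(l):
--             if pref[k] == pref[l]:
--                 wynik = max(wynik, l - k)
--     return wynik
-- ===== Notes on version B (the rewrite author's own statement) =====
-- stated objective: alternative
-- what changed: Replaced the single-pass hashmap of first occurrences of prefix-sum differences by an explicit prefix-sum array plus a brute-force double loop over all prefix pairs (k, l), taking the longest l-k with pref[k] == pref[l]; this trades A's O(n) hashing for a plainer O(n^2) scan with no dictionary.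
-- outside the precondition, e.g. on znajdzPodciagV1([1], []): A returns False, B returns False
import Mathlib
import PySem

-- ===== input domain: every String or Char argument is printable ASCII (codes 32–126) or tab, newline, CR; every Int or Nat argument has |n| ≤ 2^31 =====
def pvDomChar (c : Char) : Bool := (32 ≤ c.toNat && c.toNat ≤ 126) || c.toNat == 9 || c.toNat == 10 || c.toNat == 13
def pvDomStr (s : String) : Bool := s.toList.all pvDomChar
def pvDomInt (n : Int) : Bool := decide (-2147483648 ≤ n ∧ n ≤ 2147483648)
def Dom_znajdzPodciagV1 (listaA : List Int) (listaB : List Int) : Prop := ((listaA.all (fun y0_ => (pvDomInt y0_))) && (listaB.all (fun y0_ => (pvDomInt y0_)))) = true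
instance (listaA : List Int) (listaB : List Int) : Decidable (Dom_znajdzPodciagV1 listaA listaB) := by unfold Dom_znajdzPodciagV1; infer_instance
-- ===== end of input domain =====

-- B replaces A's one-pass hashmap of first prefix-difference occurrences by a prefix-sum
-- array and a brute-force double loop over all prefix pairs (alternative decomposition,
-- not faster); return-value equivalence is proved on pairs of equal length.

-- ===== PORT A =====
-- one loop step of A: i is the Python loop index; histo[roznica] is read by getD only
-- in the branch where 'roznica in histo', so the default 0 is never the result
def pvStepA (listaA listaB : List Int) (st : PySem.Dict Int Int × Int × Int × Int) (i : Int) :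
    PySem.Dict Int Int × Int × Int × Int :=
  let sumaA := st.2.2.1 + PySem.List.pyGetD listaA i 0
  let sumaB := st.2.2.2 + PySem.List.pyGetD listaB i 0
  let roznica := sumaA - sumaB
  if st.1.contains roznica = false then
    (st.1.insert roznica i, st.2.1, sumaA, sumaB)
  else
    (st.1, max st.2.1 (i - st.1.getD roznica 0), sumaA, sumaB)

def znajdzPodciagV1 (listaA : List Int) (listaB : List Int) : Int :=
  if listaA.length ≠ listaB.length then 0  -- Python returns False here, excluded by Pre_
  else
    ((PySem.List.pyRange 0 (listaA.length : Int) 1).foldl (pvStepA listaA listaB)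
      (PySem.Dict.empty.insert 0 (-1), 0, 0, 0)).2.1

-- ===== PORT B =====
-- pref = [0]; for a, b in zip(listaA, listaB): pref.append(pref[-1] + (a - b))
def pvPrefB (listaA listaB : List Int) : List Int :=
  (listaA.zip listaB).foldl
    (fun acc p => acc ++ [PySem.List.pyGetD acc (-1) 0 + (p.1 - p.2)]) [0]

-- inner loop: for k in range(l): if pref[k] == pref[l]: wynik = max(wynik, l - k)
def pvInnerB (pref : List Int) (l : Int) (w : Int) : Int :=
  (PySem.List.pyRange 0 l 1).foldl
    (fun w k => if PySem.List.pyGetD pref k 0 == PySem.List.pyGetD pref l 0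
                then max w (l - k) else w) w

def znajdzPodciagV1_alt (listaA : List Int) (listaB : List Int) : Int :=
  if listaA.length ≠ listaB.length then 0  -- Python returns False here, excluded by Pre_
  else
    let pref := pvPrefB listaA listaB
    (PySem.List.pyRange 1 (pref.length : Int) 1).foldl (fun w l => pvInnerB pref l w) 0

-- ===== PRECONDITION & SPEC =====
-- Pre_ excludes pairs of unequal length, on which A returns the bool False, not an Int.
def Pre_znajdzPodciagV1 (listaA : List Int) (listaB : List Int) : Prop :=
  listaA.length = listaB.length
instance (listaA : List Int) (listaB : List Int) : Decidable (Pre_znajdzPodciagV1 listaA listaB) := by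
  unfold Pre_znajdzPodciagV1; infer_instance

def pvWitness_znajdzPodciagV1 : List Int × List Int := ([2, 3, 1], [1, 4, 1])

def Spec_znajdzPodciagV1 (listaA : List Int) (listaB : List Int) (out : Int) : Prop := out = znajdzPodciagV1_alt listaA listaB
instance (listaA : List Int) (listaB : List Int) (out : Int) : Decidable (Spec_znajdzPodciagV1 listaA listaB out) := by unfold Spec_znajdzPodciagV1; infer_instance

-- ===== CLAIM (what is proved, stated in full; the proofs are below) =====
def Claim_equal_znajdzPodciagV1 : Prop := ∀ (listaA : List Int) (listaB : List Int), Dom_znajdzPodciagV1 listaA listaB → Pre_znajdzPodciagV1 listaA listaB → Spec_znajdzPodciagV1 listaA listaB (znajdzPodciagV1 listaA listaB)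

-- ===== LEMMAS AND PROOFS =====

-- prefix sum of the first k elements of the difference list: both programs' common currency
def pvP (d : List Int) (k : Nat) : Int := (d.take k).sum

-- first index k ≤ m whose prefix sum is v (what A's histo stores, shifted by -1)
def pvG (d : List Int) (v : Int) (m : Nat) : Option Nat :=
  ((List.range (m + 1)).filter (fun k => pvP d k == v)).head?

-- first index k < l with pvP d k = pvP d l, else l itself
def pvFirst (d : List Int) (l : Nat) : Nat :=
  (((List.range l).filter (fun k => pvP d k == pvP d l)).head?).getD l

-- longest zero-sum span among the first m elements of d
def pvBest (d : List Int) : Nat → Int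
  | 0 => 0
  | m + 1 => max (pvBest d m) ((m + 1 : Int) - (pvFirst d (m + 1) : Int))

lemma pvBest_nonneg (d : List Int) (m : Nat) : 0 ≤ pvBest d m := by
  induction m with
  | zero => simp [pvBest]
  | succ m ih => simp [pvBest]; left; exact ih

lemma pvG_succ_of_some (d : List Int) (v : Int) (m k : Nat) (h : pvG d v m = some k) :
    pvG d v (m + 1) = some k := by
  unfold pvG at h ⊢
  rw [List.range_succ, List.filter_append, List.head?_append, h]
  rfl

lemma pvG_succ_of_none (d : List Int) (v : Int) (m : Nat) (h : pvG d v m = none) :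
    pvG d v (m + 1) = if pvP d (m + 1) = v then some (m + 1) else none := by
  unfold pvG at h ⊢
  rw [List.range_succ, List.filter_append, List.head?_append, h]
  by_cases hp : pvP d (m+1) = v <;> simp [hp]

lemma pvP_zipWith (listaA listaB : List Int) (h : listaA.length = listaB.length) (m : Nat) :
    pvP (List.zipWith (fun a b => a - b) listaA listaB) m
      = (listaA.take m).sum - (listaB.take m).sum := by
  unfold pvP
  induction listaA generalizing listaB m with
  | nil => cases listaB with
    | nil => simp
    | cons b bs => simp at h
  | cons a as ih => cases listaB with
    | nil => simp at h
    | cons b bs =>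
      cases m with
      | zero => simp
      | succ m =>
        simp only [List.zipWith_cons_cons, List.take_succ_cons, List.sum_cons]
        rw [ih bs (by simpa using h) m]; ring

lemma take_succ_sum (xs : List Int) (m : Nat) (hm : m < xs.length) :
    (xs.take (m + 1)).sum = (xs.take m).sum + xs.getD m 0 := by
  rw [List.getD_eq_getElem _ _ hm, List.take_add_one, List.sum_append]
  simp [List.getElem?_eq_getElem hm]

-- ----- A-side: the loop invariant (histo stores first occurrence - 1; wynik is pvBest) -----
lemma A_loop (listaA listaB : List Int) (h : listaA.length = listaB.length) :
    ∀ m, m ≤ listaA.length → ∃ H : PySem.Dict Int Int,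
      (PySem.List.pyRange 0 (m : Int) 1).foldl (pvStepA listaA listaB)
          (PySem.Dict.empty.insert 0 (-1), 0, 0, 0)
        = (H, pvBest (List.zipWith (fun a b => a - b) listaA listaB) m,
            (listaA.take m).sum, (listaB.take m).sum)
      ∧ ∀ v, H.get? v
          = (pvG (List.zipWith (fun a b => a - b) listaA listaB) v m).map (fun k : Nat => (k : Int) - 1) := by
  set d := List.zipWith (fun a b => a - b) listaA listaB with hd
  intro m
  induction m with
  | zero =>
    intro _
    refine ⟨PySem.Dict.empty.insert 0 (-1), ?_, ?_⟩
    · rw [show ((0:Nat):Int) = 0 by norm_num, PySem.List.pyRange_one_eq_nil (by norm_num)]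
      rfl
    · intro v
      rw [PySem.Dict.get?_insert, PySem.Dict.get?_empty]
      have h0 : pvP d 0 = 0 := by simp [pvP]
      unfold pvG
      rw [List.range_one, List.filter_singleton]
      by_cases hv : v = 0
      · subst hv; simp [h0]
      · rw [if_neg hv, h0, show ((0:Int) == v) = false from beq_eq_false_iff_ne.mpr (Ne.symm hv)]
        rfl
  | succ m ih =>
    intro hm
    obtain ⟨H, hfold, hspec⟩ := ih (by omega)
    have h1 : ((m + 1 : Nat) : Int) = (m : Int) + 1 := by push_cast; ring
    rw [h1, PySem.List.pyRange_one_succ_right (by positivity), List.foldl_append, hfold]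
    simp only [List.foldl_cons, List.foldl_nil]
    unfold pvStepA
    dsimp only
    have hsa : (listaA.take m).sum + PySem.List.pyGetD listaA (m : Int) 0 = (listaA.take (m+1)).sum := by
      rw [PySem.List.pyGetD_natCast, take_succ_sum listaA m (by omega)]
    have hsb : (listaB.take m).sum + PySem.List.pyGetD listaB (m : Int) 0 = (listaB.take (m+1)).sum := by
      rw [PySem.List.pyGetD_natCast, take_succ_sum listaB m (by omega)]
    have hroz : (listaA.take (m+1)).sum - (listaB.take (m+1)).sum = pvP d (m + 1) := by
      rw [pvP_zipWith listaA listaB h]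
    rw [hsa, hsb, hroz]
    have hcont : H.contains (pvP d (m+1)) = (pvG d (pvP d (m+1)) m).isSome := by
      rw [PySem.Dict.contains_eq_isSome_get?, hspec]
      cases pvG d (pvP d (m+1)) m <;> rfl
    rcases hG : pvG d (pvP d (m+1)) m with _ | k
    · -- prefix value not seen: Python inserts histo[roznica] = i
      rw [hcont, hG]
      simp only [Option.isSome_none]
      rw [if_pos trivial]
      refine ⟨H.insert (pvP d (m+1)) (m : Int), ?_, ?_⟩
      · have hb : pvBest d (m+1) = pvBest d m := by
          show max (pvBest d m) ((m + 1 : Int) - (pvFirst d (m + 1) : Int)) = pvBest d m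
          have : pvFirst d (m+1) = m+1 := by
            show (pvG d (pvP d (m + 1)) m).getD (m + 1) = m + 1
            rw [hG]; rfl
          rw [this]
          push_cast
          rw [sub_self, max_eq_left (pvBest_nonneg d m)]
        rw [hb]
      · intro v
        rw [PySem.Dict.get?_insert]
        by_cases hv : v = pvP d (m+1)
        · subst hv
          rw [if_pos rfl, pvG_succ_of_none d _ m hG, if_pos rfl]
          simp only [Option.map_some]
          congr 1
          push_cast; ring
        · rw [if_neg hv, hspec v]
          rcases hGv : pvG d v m with _ | k'
          · rw [pvG_succ_of_none d v m hGv, if_neg (fun hh => hv hh.symm)]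
          · rw [pvG_succ_of_some d v m k' hGv]
    · -- seen at first index k: Python takes the max
      rw [hcont, hG]
      simp only [Option.isSome_some]
      rw [if_neg (by simp)]

      refine ⟨H, ?_, ?_⟩
      · have hg : H.getD (pvP d (m+1)) 0 = (k : Int) - 1 := by
          rw [PySem.Dict.getD_eq_get?_getD, hspec, hG]; rfl
        rw [hg]
        have hb : pvBest d (m+1) = max (pvBest d m) ((m : Int) - ((k : Int) - 1)) := by
          show max (pvBest d m) ((m + 1 : Int) - (pvFirst d (m + 1) : Int)) = _
          have : pvFirst d (m+1) = k := by
            show (pvG d (pvP d (m + 1)) m).getD (m + 1) = k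
            rw [hG]; rfl
          rw [this]
          congr 1
          ring
        rw [hb]
      · intro v
        rw [hspec v]
        rcases hGv : pvG d v m with _ | k'
        · have hv : v ≠ pvP d (m+1) := by
            intro hh; rw [hh] at hGv; rw [hGv] at hG; cases hG
          rw [pvG_succ_of_none d v m hGv, if_neg (fun hh => hv hh.symm)]
        · rw [pvG_succ_of_some d v m k' hGv]

lemma A_eq_best (listaA listaB : List Int) (h : listaA.length = listaB.length) :
    znajdzPodciagV1 listaA listaB
      = pvBest (List.zipWith (fun a b => a - b) listaA listaB) listaA.length := by
  unfold znajdzPodciagV1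
  rw [if_neg (by omega)]
  obtain ⟨H, hfold, _⟩ := A_loop listaA listaB h listaA.length le_rfl
  rw [hfold]

-- ----- B-side: pref is the scanl of prefix sums; the double loop computes pvBest -----
lemma scanl_getD (d : List Int) (s : Int) (k : Nat) (hk : k ≤ d.length) :
    (List.scanl (· + ·) s d).getD k 0 = s + pvP d k := by
  induction d generalizing s k with
  | nil => simp at hk; subst hk; simp [pvP]
  | cons x xs ih =>
    cases k with
    | zero => simp [pvP]
    | succ k =>
      simp only [List.scanl_cons, List.getD_cons_succ]
      rw [ih (s + x) k (by simpa using hk)]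
      simp [pvP]; ring

lemma prefB_fold (l : List Int) (ys : List Int) (s : Int) :
    l.foldl (fun acc x => acc ++ [PySem.List.pyGetD acc (-1) 0 + x]) (ys ++ [s])
      = ys ++ List.scanl (· + ·) s l := by
  induction l generalizing ys s with
  | nil => simp
  | cons x xs ih =>
    simp only [List.foldl_cons, List.scanl_cons]
    rw [PySem.List.pyGetD_neg_one_append_singleton]
    have := ih (ys ++ [s]) (s + x)
    simpa using this

lemma zipWith_eq_map_zip (xs ys : List Int) :
    List.zipWith (fun a b => a - b) xs ys = (xs.zip ys).map (fun p => p.1 - p.2) := by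
  induction xs generalizing ys with
  | nil => simp
  | cons a as ih => cases ys <;> simp [ih]

lemma pvPrefB_eq_scanl (listaA listaB : List Int) :
    pvPrefB listaA listaB
      = List.scanl (· + ·) 0 (List.zipWith (fun a b => a - b) listaA listaB) := by
  unfold pvPrefB
  rw [zipWith_eq_map_zip]
  have h2 := prefB_fold ((listaA.zip listaB).map (fun p => p.1 - p.2)) [] 0
  rw [List.foldl_map] at h2
  simpa using h2

lemma foldl_max_desc (t : List Nat) (g : Nat → Int) :
    ∀ (w : Int) (x : Nat), (∀ y ∈ t, g y ≤ g x) →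
      t.foldl (fun w k => max w (g k)) (max w (g x)) = max w (g x) := by
  induction t with
  | nil => intro w x _; rfl
  | cons y t ih =>
    intro w x h
    simp only [List.foldl_cons]
    have h1 : g y ≤ g x := h y List.mem_cons_self
    have : max (max w (g x)) (g y) = max w (g x) := by
      rw [max_eq_left]; exact le_max_of_le_right h1
    rw [this]
    exact ih w x (fun z hz => h z (List.mem_cons_of_mem _ hz))

lemma B_inner (d : List Int) (l : Nat) (hl : l ≤ d.length) (w : Int) (hw : 0 ≤ w) :
    pvInnerB (List.scanl (· + ·) 0 d) (l : Int) w = max w ((l : Int) - (pvFirst d l : Int)) := by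
  unfold pvInnerB
  rw [PySem.List.pyRange_zero_nat, List.foldl_map]
  have hget : ∀ k ∈ List.range l,
      PySem.List.pyGetD (List.scanl (· + ·) 0 d) ((k : Nat) : Int) 0 = pvP d k := by
    intro k hk
    rw [PySem.List.pyGetD_natCast, scanl_getD d 0 k (by simp at hk; omega)]
    ring
  have hgetl : PySem.List.pyGetD (List.scanl (· + ·) 0 d) ((l : Nat) : Int) 0 = pvP d l := by
    rw [PySem.List.pyGetD_natCast, scanl_getD d 0 l hl]; ring
  rw [PySem.List.foldl_congr_mem (List.range l) _
    (fun w k => if pvP d k == pvP d l then max w ((l : Int) - (k : Int)) else w) w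
    (by intro acc k hk; rw [hget k hk, hgetl])]
  rw [PySem.List.foldl_if_eq_foldl_filter]
  rcases hF : (List.range l).filter (fun k => pvP d k == pvP d l) with _ | ⟨k0, rest⟩
  · unfold pvFirst
    rw [hF]
    simp only [List.head?_nil, Option.getD_none, List.foldl_nil, sub_self]
    rw [max_eq_left hw]
  · unfold pvFirst
    rw [hF]
    simp only [List.head?_cons, Option.getD_some, List.foldl_cons]
    have hpw : List.Pairwise (· < ·) (k0 :: rest) := by
      rw [← hF]; exact (List.pairwise_lt_range).sublist List.filter_sublist
    have hb : ∀ y ∈ rest, ((l : Int) - (y : Int)) ≤ ((l : Int) - (k0 : Int)) := by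
      intro y hy
      have := (List.pairwise_cons.mp hpw).1 y hy
      omega
    exact foldl_max_desc rest (fun k => (l : Int) - (k : Int)) w k0 hb

lemma B_outer (d : List Int) : ∀ m, m ≤ d.length →
    (PySem.List.pyRange 1 ((m : Int) + 1) 1).foldl
      (fun w l => pvInnerB (List.scanl (· + ·) 0 d) l w) 0 = pvBest d m := by
  intro m
  induction m with
  | zero => intro _; rw [show ((0:Nat):Int) + 1 = 1 by norm_num, PySem.List.pyRange_one_eq_nil (by norm_num)]; rfl
  | succ m ih =>
    intro hm
    have h1 : ((m + 1 : Nat) : Int) + 1 = ((m : Int) + 1) + 1 := by push_cast; ring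
    rw [h1, PySem.List.pyRange_one_succ_right (by omega), List.foldl_append,
      ih (by omega)]
    simp only [List.foldl_cons, List.foldl_nil]
    have h2 : ((m : Int) + 1) = ((m + 1 : Nat) : Int) := by push_cast; ring
    rw [h2, B_inner d (m + 1) (by omega) _ (pvBest_nonneg d m)]
    rfl

lemma B_eq_best (listaA listaB : List Int) (h : listaA.length = listaB.length) :
    znajdzPodciagV1_alt listaA listaB
      = pvBest (List.zipWith (fun a b => a - b) listaA listaB) listaA.length := by
  unfold znajdzPodciagV1_alt
  rw [if_neg (by omega)]
  rw [pvPrefB_eq_scanl]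
  simp only []
  have hlen : (List.scanl (· + ·) 0 (List.zipWith (fun a b => a - b) listaA listaB)).length
      = listaA.length + 1 := by
    rw [List.length_scanl, List.length_zipWith, h, min_self]
  rw [hlen]
  have := B_outer (List.zipWith (fun a b => a - b) listaA listaB) listaA.length
    (by rw [List.length_zipWith, h, min_self])
  rw [← this]
  norm_num

-- ===== VERDICT (by name: the statement is the Claim_ definition above) =====
theorem znajdzPodciagV1_spec : Claim_equal_znajdzPodciagV1 := by
  intro listaA listaB _ hpre
  unfold Spec_znajdzPodciagV1
  rw [A_eq_best listaA listaB hpre, B_eq_best listaA listaB hpre]
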